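-- pv_equiv track=rewrite | github.com/kaestro/algorithms_v3 | Categorized Practices/backtracking/2597 - LeetCode.py | countPairsWithDiff
-- ===== SOURCE A (Python) =====
-- from typing import List
-- from collections import defaultdict, Counter
--
-- def countPairsWithDiff(nums: List[int], diff: int) -> int:
--     num_counts = Counter(nums)
--
--     def calculate_dp(num):
--         if (num - diff) in num_counts:
--             num_not_included_pair_count, num_included_pair_count = calculate_dp(num - diff)
--         else:
--             num_not_included_pair_count, num_included_pair_count = 1, 0
--         return num_not_included_pair_count + num_included_pair_count, num_not_included_pair_count * (pow(2, num_counts[num]) - 1)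
--
--     total = 1
--     for num in num_counts:
--         if not num_counts[num + diff]:
--             total *= sum(calculate_dp(num))
--     return total - 1
-- ===== SOURCE B (Python) =====
-- from typing import List
-- from collections import Counter
--
-- def countPairsWithDiff(nums: List[int], diff: int) -> int:
--     counts = Counter(nums)
--     total = 1
--     for v in counts:
--         if counts[v + diff]:
--             continue  # v is not a chain head
--         # walk down to the bottom of v's chain
--         u = v
--         while (u - diff) in counts:
--             u -= diff
--         # iterate upward from the bottom maintaining (not_included, included)
--         not_incl, incl = 1, 0
--         while True:
--             not_incl, incl = not_incl + incl, not_incl * (2 ** counts[u] - 1)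
--             if u == v:
--                 break
--             u += diff
--         total *= not_incl + incl
--     return total - 1
-- ===== Notes on version B (the rewrite author's own statement) =====
-- stated objective: alternative
-- what changed: A computes each chain's (not-included, included) pair by top-down recursion from the chain head; B finds the chain bottom with an iterative downward walk and then folds the same pair-recurrence upward in an explicit loop, no recursion.
import Mathlib
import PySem

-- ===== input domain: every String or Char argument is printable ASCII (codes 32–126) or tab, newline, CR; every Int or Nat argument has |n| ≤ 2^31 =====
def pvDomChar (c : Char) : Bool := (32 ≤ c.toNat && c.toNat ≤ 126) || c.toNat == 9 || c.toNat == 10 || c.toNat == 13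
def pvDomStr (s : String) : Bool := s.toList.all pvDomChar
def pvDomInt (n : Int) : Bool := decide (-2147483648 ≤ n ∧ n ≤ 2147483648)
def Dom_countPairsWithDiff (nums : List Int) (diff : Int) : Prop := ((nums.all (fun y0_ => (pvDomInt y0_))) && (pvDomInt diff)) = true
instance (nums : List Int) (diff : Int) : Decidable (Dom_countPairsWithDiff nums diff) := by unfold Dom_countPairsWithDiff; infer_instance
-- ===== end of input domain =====

-- B replaces A's top-down recursion per chain by an iterative walk to the chain bottom
-- followed by a bottom-up loop over the chain (objective: alternative decomposition, same cost).

-- ===== PORT A =====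
-- calculate_dp, recursion on (num - diff) ∈ num_counts; the fuel argument only makes the
-- recursion structural — with fuel ≥ nums.length + 1 it is never exhausted on A's calls
-- (chains of distinct keys when diff ≠ 0; dp is never called when diff = 0).
def calcDpA (counts : PySem.Dict Int Int) (diff : Int) : Nat → Int → Int × Int
  | 0, _ => (1, 0)
  | fuel+1, num =>
    let p := if (counts.get? (num - diff)).isSome then calcDpA counts diff fuel (num - diff) else (1, 0)
    (p.1 + p.2, p.1 * ((2 : Int) ^ (counts.getD num 0).toNat - 1))

def countPairsWithDiff (nums : List Int) (diff : Int) : Int :=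
  let numCounts := PySem.Dict.counter nums
  let total := numCounts.keys.foldl (fun total num =>
    if numCounts.getD (num + diff) 0 = 0 then
      let p := calcDpA numCounts diff (nums.length + 1) num
      total * (p.1 + p.2)
    else total) 1
  total - 1

-- ===== PORT B =====
-- the downward walk 'while (u - diff) in counts: u -= diff', returning the bottom and the
-- number of steps taken; fuel = nums.length is never exhausted on B's calls.
def chainBottomB (counts : PySem.Dict Int Int) (diff : Int) : Nat → Int → Int × Nat
  | 0, u => (u, 0)
  | fuel+1, u =>
    if (counts.get? (u - diff)).isSome then
      let p := chainBottomB counts diff fuel (u - diff)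
      (p.1, p.2 + 1)
    else (u, 0)

-- one bottom-up step of B's inner loop
def chainStepB (counts : PySem.Dict Int Int) (st : Int × Int) (u : Int) : Int × Int :=
  (st.1 + st.2, st.1 * ((2 : Int) ^ (counts.getD u 0).toNat - 1))

def countPairsWithDiff_alt (nums : List Int) (diff : Int) : Int :=
  let counts := PySem.Dict.counter nums
  let total := counts.keys.foldl (fun total v =>
    if counts.getD (v + diff) 0 = 0 then
      let bn := chainBottomB counts diff nums.length v
      let chain := (List.range (bn.2 + 1)).map (fun (i : Nat) => bn.1 + (i : Int) * diff)
      let st := chain.foldl (chainStepB counts) (1, 0)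
      total * (st.1 + st.2)
    else total) 1
  total - 1

-- ===== PRECONDITION & SPEC =====
def Spec_countPairsWithDiff (nums : List Int) (diff : Int) (out : Int) : Prop := out = countPairsWithDiff_alt nums diff
instance (nums : List Int) (diff : Int) (out : Int) : Decidable (Spec_countPairsWithDiff nums diff out) := by unfold Spec_countPairsWithDiff; infer_instance

-- ===== CLAIM (what is proved, stated in full; the proofs are below) =====
def Claim_equal_countPairsWithDiff : Prop := ∀ (nums : List Int) (diff : Int), Dom_countPairsWithDiff nums diff → Spec_countPairsWithDiff nums diff (countPairsWithDiff nums diff)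

-- ===== LEMMAS AND PROOFS =====

-- the bottom plus (#steps)·diff is the starting value
theorem chainBottomB_inv (counts : PySem.Dict Int Int) (diff : Int) :
    ∀ (f : Nat) (u : Int), (chainBottomB counts diff f u).1 + ((chainBottomB counts diff f u).2 : Int) * diff = u := by
  intro f
  induction f with
  | zero => intro u; simp [chainBottomB]
  | succ f ih =>
    intro u
    by_cases h : (counts.get? (u - diff)).isSome
    · have := ih (u - diff)
      simp only [chainBottomB, h, if_pos]
      push_cast
      linarith
    · simp [chainBottomB, h]

-- A's recursion with fuel f+1 computes exactly B's bottom-up fold over the chain found with fuel f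
theorem calcDpA_eq_fold (counts : PySem.Dict Int Int) (diff : Int) :
    ∀ (f : Nat) (num : Int),
      calcDpA counts diff (f + 1) num =
        (((List.range ((chainBottomB counts diff f num).2 + 1)).map
            (fun (i : Nat) => (chainBottomB counts diff f num).1 + (i : Int) * diff)).foldl
          (chainStepB counts) (1, 0)) := by
  intro f
  induction f with
  | zero =>
    intro num
    by_cases h : (counts.get? (num - diff)).isSome <;>
      simp [calcDpA, chainBottomB, chainStepB, h]
  | succ f ih =>
    intro num
    by_cases h : (counts.get? (num - diff)).isSome
    · have hbot := chainBottomB_inv counts diff f (num - diff)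
      have hrec : chainBottomB counts diff (f + 1) num =
          ((chainBottomB counts diff f (num - diff)).1,
           (chainBottomB counts diff f (num - diff)).2 + 1) := by
        simp [chainBottomB, h]
      have htop : (chainBottomB counts diff f (num - diff)).1 +
          ((((chainBottomB counts diff f (num - diff)).2 + 1 : Nat)) : Int) * diff = num := by
        push_cast
        push_cast at hbot
        linarith
      calc calcDpA counts diff (f + 1 + 1) num
          = chainStepB counts (calcDpA counts diff (f + 1) (num - diff)) num := by
            simp [calcDpA, h, chainStepB]
        _ = chainStepB counts
              ((((List.range ((chainBottomB counts diff f (num - diff)).2 + 1)).map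
                  (fun (i : Nat) => (chainBottomB counts diff f (num - diff)).1 + (i : Int) * diff)).foldl
                (chainStepB counts) (1, 0))) num := by rw [ih]
        _ = _ := by
            rw [hrec]
            simp only [List.range_succ, List.map_append, List.map_cons, List.map_nil,
              List.foldl_append, List.foldl_cons, List.foldl_nil]
            rw [htop]
    · have hrec : chainBottomB counts diff (f + 1) num = (num, 0) := by
        simp [chainBottomB, h]
      have h0 : calcDpA counts diff (f + 1 + 1) num = chainStepB counts (1, 0) num := by
        simp [calcDpA, h, chainStepB]
      rw [hrec, h0]
      simp [chainStepB]

-- ===== VERDICT (by name: the statement is the Claim_ definition above) =====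
theorem countPairsWithDiff_spec : Claim_equal_countPairsWithDiff := by
  intro nums diff _
  unfold Spec_countPairsWithDiff countPairsWithDiff countPairsWithDiff_alt
  refine congrArg (fun t => t - 1) ?_
  apply PySem.List.foldl_congr_mem
  intro total v _
  by_cases h : (PySem.Dict.counter nums).getD (v + diff) 0 = 0
  · rw [if_pos h, if_pos h]
    rw [calcDpA_eq_fold (PySem.Dict.counter nums) diff nums.length v]
  · rw [if_neg h, if_neg h]
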